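-- pv_equiv track=rewrite | github.com/AnthonyRajuKondaveeti/medextract-ai | src/excel_writer.py | _normalize_multi_value
-- ===== SOURCE A (Python) =====
-- def _normalize_spelling(text: str) -> str:
--     """
--     Normalize spelling variations (case, punctuation, extra spaces).
--     Example: "NORMAL STUDY." → "Normal Study"
--     """
--     if not text:
--         return text
--
--     # Remove trailing punctuation
--     text = text.rstrip('.,;:!?')
--
--     # Normalize whitespace
--     text = ' '.join(text.split())
--
--     # Title case for common medical terms
--     text_upper = text.upper()
--
--     # Keep acronyms uppercase, title case for words
--     if text_upper in ['NORMAL', 'ABNORMAL', 'NAD', 'WNL', 'NIL', 'ABSENT', 'PRESENT']: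
--         return text_upper
--
--     # Title case for mixed text
--     return text.title()
--
-- def _normalize_multi_value(value: str | None) -> str | None:
--     """
--     Normalize fields with pipe-separated multiple values.
--     Returns first unique non-empty value with spelling normalization.
--     Example: "Normal | NORMAL | NORMAL STUDY." → "NORMAL"
--     """
--     if not value or not isinstance(value, str):
--         return value
--
--     if '|' not in value:
--         return _normalize_spelling(value.strip()) if value.strip() else None
--
--     parts = [p.strip() for p in value.split('|')]
--
--     # Normalize spelling for each part
--     normalized_parts = [_normalize_spelling(p) for p in parts if p]
--
--     # Remove duplicates (case-insensitive) while preserving order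
--     seen = set()
--     unique = []
--     for part in normalized_parts:
--         part_lower = part.lower()
--         if part and part_lower not in seen:
--             seen.add(part_lower)
--             unique.append(part)
--
--     return unique[0] if unique else None
-- ===== SOURCE B (Python) =====
-- def _normalize_spelling(text: str) -> str:
--     if not text:
--         return text
--     text = text.rstrip('.,;:!?')
--     text = ' '.join(text.split())
--     text_upper = text.upper()
--     if text_upper in ['NORMAL', 'ABNORMAL', 'NAD', 'WNL', 'NIL', 'ABSENT', 'PRESENT']:
--         return text_upper
--     return text.title()
--
-- def _normalize_multi_value(value):
--     if not value or not isinstance(value, str):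
--         return value
--     if '|' not in value:
--         return _normalize_spelling(value.strip()) if value.strip() else None
--     for raw in value.split('|'):
--         part = raw.strip()
--         if not part:
--             continue
--         normalized = _normalize_spelling(part)
--         if normalized:
--             return normalized
--     return None
-- ===== Notes on version B (the rewrite author's own statement) =====
-- stated objective: simpler
-- what changed: The pipe branch's two list-building passes (strip+filter comprehension, normalize comprehension) and the seen-set/unique-list dedup loop followed by unique[0] are collapsed into one short-circuiting loop that returns the first truthy normalized stripped part.
import Mathlib
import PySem

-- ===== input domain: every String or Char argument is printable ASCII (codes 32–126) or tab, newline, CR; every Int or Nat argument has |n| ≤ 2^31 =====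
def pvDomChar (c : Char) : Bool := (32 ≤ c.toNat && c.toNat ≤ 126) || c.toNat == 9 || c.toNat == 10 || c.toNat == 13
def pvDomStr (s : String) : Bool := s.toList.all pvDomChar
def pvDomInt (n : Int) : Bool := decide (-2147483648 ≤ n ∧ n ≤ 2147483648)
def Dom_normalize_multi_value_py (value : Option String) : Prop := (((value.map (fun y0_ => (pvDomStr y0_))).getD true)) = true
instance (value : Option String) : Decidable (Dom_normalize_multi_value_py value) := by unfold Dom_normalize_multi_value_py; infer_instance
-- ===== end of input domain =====

-- B replaces A's two list-building passes plus set-based dedup with a single short-circuiting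
-- scan over the split parts that returns the first truthy normalized value (objective: simpler).


-- ===== PORT A =====
-- text.rstrip('.,;:!?') — ported by hand (PySem has no rstrip-with-chars); exact: drops the
-- maximal trailing run of characters from the given set.
def pvRstripPunct (cs : List Char) : List Char :=
  (cs.reverse.dropWhile (fun c => (".,;:!?".toList).contains c)).reverse

-- text.title() — ported by hand; exact on the ASCII domain Dom guarantees (there the cased
-- characters are exactly the letters): a letter after a letter is lowercased, otherwise uppercased.
def pvTitle (cs : List Char) (prevAlpha : Bool) : List Char :=
  match cs with
  | [] => []
  | c :: rest =>
      if PySem.Chars.isalpha c then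
        (if prevAlpha then PySem.Chars.lowerChar c else PySem.Chars.upperChar c) :: pvTitle rest true
      else
        c :: pvTitle rest false

-- _normalize_spelling, on List Char (shared verbatim by both Pythons)
def pvNormSpell (cs : List Char) : List Char :=
  if cs = [] then cs
  else
    let t1 := pvRstripPunct cs
    let t2 := PySem.Chars.join [' '] (PySem.Chars.split₀ t1)
    let tU := PySem.Chars.upper t2
    if tU ∈ ["NORMAL".toList, "ABNORMAL".toList, "NAD".toList, "WNL".toList,
             "NIL".toList, "ABSENT".toList, "PRESENT".toList] then tU
    else pvTitle t2 false

-- A's dedup loop: for part in normalized_parts: if part and part.lower() not in seen: …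
def pvDedupLoop (seen : PySem.Set (List Char)) (unique : List (List Char)) :
    List (List Char) → List (List Char)
  | [] => unique
  | p :: rest =>
      let pl := PySem.Chars.lower p
      if p ≠ [] ∧ pl ∉ seen then pvDedupLoop (seen.add pl) (unique ++ [p]) rest
      else pvDedupLoop seen unique rest

def normalize_multi_value_py (value : Option String) : Option String :=
  match value with
  | none => none                                -- not value → return value
  | some s =>
    if s.toList = [] then some s                -- not value → return value
    else if PySem.Str.isIn "|" s = false then
      if PySem.Chars.strip s.toList = [] then none
      else some (String.ofList (pvNormSpell (PySem.Chars.strip s.toList)))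
    else
      let parts := (PySem.Chars.splitOn s.toList ['|']).map PySem.Chars.strip
      let normalized_parts := (parts.filter (fun p => !p.isEmpty)).map pvNormSpell
      match (pvDedupLoop (PySem.Set.ofList []) [] normalized_parts).head? with
      | some u => some (String.ofList u)            -- unique[0]
      | none => none

-- ===== PORT B =====
-- B's single pass: first truthy normalized stripped part, else None
def pvFirstNorm : List (List Char) → Option (List Char)
  | [] => none
  | raw :: rest =>
      let part := PySem.Chars.strip raw
      if part = [] then pvFirstNorm rest
      else
        let n := pvNormSpell part
        if n = [] then pvFirstNorm rest else some n

def normalize_multi_value_py_alt (value : Option String) : Option String :=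
  match value with
  | none => none
  | some s =>
    if s.toList = [] then some s
    else if PySem.Str.isIn "|" s = false then
      if PySem.Chars.strip s.toList = [] then none
      else some (String.ofList (pvNormSpell (PySem.Chars.strip s.toList)))
    else
      match pvFirstNorm (PySem.Chars.splitOn s.toList ['|']) with
      | some n => some (String.ofList n)
      | none => none

-- ===== PRECONDITION & SPEC =====
def Spec_normalize_multi_value_py (value : Option String) (out : Option String) : Prop := out = normalize_multi_value_py_alt value
instance (value : Option String) (out : Option String) : Decidable (Spec_normalize_multi_value_py value out) := by unfold Spec_normalize_multi_value_py; infer_instance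

-- ===== CLAIM (what is proved, stated in full; the proofs are below) =====
def Claim_equal_normalize_multi_value_py : Prop := ∀ (value : Option String), Dom_normalize_multi_value_py value → Spec_normalize_multi_value_py value (normalize_multi_value_py value)

-- ===== LEMMAS AND PROOFS =====

-- once 'unique' is nonempty its head is the final result's head
lemma pvDedupLoop_head (rest : List (List Char)) :
    ∀ (seen : PySem.Set (List Char)) (u : List Char) (us : List (List Char)),
      (pvDedupLoop seen (u :: us) rest).head? = some u := by
  induction rest with
  | nil => intro seen u us; simp [pvDedupLoop]
  | cons p rest ih =>
      intro seen u us
      simp only [pvDedupLoop]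
      split
      · rw [List.cons_append]; exact ih _ _ _
      · exact ih _ _ _

-- A's dedup pipeline and B's single pass return the same first value
lemma pvMain (ps : List (List Char)) :
    (pvDedupLoop (PySem.Set.ofList []) []
        (((ps.map PySem.Chars.strip).filter (fun p => !p.isEmpty)).map pvNormSpell)).head?
      = pvFirstNorm ps := by
  induction ps with
  | nil => simp [pvDedupLoop, pvFirstNorm]
  | cons p rest ih =>
      by_cases hq : PySem.Chars.strip p = []
      · simpa [pvFirstNorm, hq] using ih
      · by_cases hn : pvNormSpell (PySem.Chars.strip p) = []
        · simpa [pvFirstNorm, pvDedupLoop, hq, hn, List.isEmpty_iff] using ih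
        · simp [pvFirstNorm, pvDedupLoop, hq, hn,
                pvDedupLoop_head]

-- ===== VERDICT (by name: the statement is the Claim_ definition above) =====
theorem normalize_multi_value_py_spec : Claim_equal_normalize_multi_value_py := by
  intro value _
  unfold Spec_normalize_multi_value_py normalize_multi_value_py normalize_multi_value_py_alt
  cases value with
  | none => rfl
  | some s => simp only [pvMain]
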